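-- pv_equiv track=rewrite | github.com/alexandraback/datacollection | solutions_6377668744314880_0/Python/QuantumCaffeine/logging.py | solve
-- ===== SOURCE A (Python) =====
-- def leftOfLine(point, start, end):
--     test = (end[0] - start[0])*(point[1] - end[1]) - \
--            (end[1] - start[1])*(point[0] - end[0])
--     return test
--
-- def solve(n, trees):
--     results = []
--     for tree in trees:
--         bestcutdown = n - 1
--         for othertree in trees:
--             if othertree == tree:
--                 continue
--             left, right = 0, 0
--             for checktree in trees:
--                 if (checktree == tree) or (checktree == othertree):
--                     continue
--                 test = leftOfLine(checktree, tree, othertree)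
--                 if test > 0:
--                     left += 1
--                 elif test < 0:
--                     right += 1
--             best = min(left, right)
--             if best < bestcutdown:
--                 bestcutdown = best
--         results.append(str(bestcutdown))
--     return '\n' + '\n'.join(results)
-- ===== SOURCE B (Python) =====
-- def go(vs, acc):
--     # triangular pass: each unordered pair's cross product is computed once;
--     # antisymmetry (cross(e,d) = -cross(d,e)) updates both endpoints' counts.
--     mins = []
--     while vs:
--         d, rest = vs[0], vs[1:]
--         (l, r), accrest = acc[0], acc[1:]
--         dx, dy = d
--         new = []
--         for (ex, ey), (le, re) in zip(rest, accrest):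
--             c = dx * ey - dy * ex
--             if c > 0:
--                 l += 1
--                 new.append((le, re + 1))
--             elif c < 0:
--                 r += 1
--                 new.append((le + 1, re))
--             else:
--                 new.append((le, re))
--         mins.append(min(l, r))
--         vs, acc = rest, new
--     return mins
--
-- def solve(n, trees):
--     lines = []
--     for t in trees:
--         tx, ty = t
--         vs = [(x - tx, y - ty) for (x, y) in trees if (x, y) != t]
--         mins = go(vs, [(0, 0)] * len(vs))
--         best = n - 1
--         for b in mins:
--             best = min(best, b)
--         lines.append(str(best))
--     return '\n' + '\n'.join(lines)
-- ===== Notes on version B (the rewrite author's own statement) =====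
-- stated objective: faster
-- what changed: Per point, B filters out copies of the centre once, switches to difference vectors, and makes a single triangular pass over unordered pairs computing each cross product once, using antisymmetry to update the left/right counts of both endpoints simultaneously, instead of A's per-direction rescans of the whole list with skip tests and a 3-point orientation call.
import Mathlib
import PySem

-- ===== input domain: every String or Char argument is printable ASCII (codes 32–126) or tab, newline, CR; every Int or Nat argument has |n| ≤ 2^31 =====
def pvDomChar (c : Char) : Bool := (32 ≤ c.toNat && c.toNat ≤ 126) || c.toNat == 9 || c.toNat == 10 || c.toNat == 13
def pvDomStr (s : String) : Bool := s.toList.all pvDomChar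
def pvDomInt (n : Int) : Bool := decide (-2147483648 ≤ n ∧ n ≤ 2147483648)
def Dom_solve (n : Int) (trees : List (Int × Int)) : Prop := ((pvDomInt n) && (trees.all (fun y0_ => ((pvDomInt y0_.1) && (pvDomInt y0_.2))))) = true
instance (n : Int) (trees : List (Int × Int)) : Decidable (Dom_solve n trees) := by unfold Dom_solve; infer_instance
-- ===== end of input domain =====

-- B replaces A's per-direction rescans by one triangular pass over unordered pairs (each cross
-- product computed once, antisymmetry updates both endpoints' counts): measurably faster by a
-- constant factor; return value proved identical.

-- ===== PORT A =====
def leftOfLine (point start e : Int × Int) : Int :=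
  (e.1 - start.1) * (point.2 - e.2) - (e.2 - start.2) * (point.1 - e.1)

def solve (n : Int) (trees : List (Int × Int)) : String :=
  let results := trees.foldl (fun results tree =>
    let bestcutdown := trees.foldl (fun bestcutdown othertree =>
      if othertree == tree then bestcutdown
      else
        let lr := trees.foldl (fun (lr : Int × Int) checktree =>
          if checktree == tree || checktree == othertree then lr
          else
            let test := leftOfLine checktree tree othertree
            if test > 0 then (lr.1 + 1, lr.2)
            else if test < 0 then (lr.1, lr.2 + 1)
            else lr) ((0 : Int), (0 : Int))
        let best := min lr.1 lr.2
        if best < bestcutdown then best else bestcutdown) (n - 1)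
    results ++ [PySem.Int.toStr bestcutdown]) ([] : List String)
  "\n" ++ PySem.Str.join "\n" results

-- ===== PORT B =====
-- transliteration of go from Source B: while loop = structural recursion on vs;
-- the `for … in zip(rest, accrest)` loop is a foldl over the zipped list.
def goB : List (Int × Int) → List (Int × Int) → List Int
  | [], _ => []
  | _ :: _, [] => []        -- unreachable: acc always has the same length as vs
  | d :: rest, lr :: accrest =>
    let s := (rest.zip accrest).foldl
      (fun (s : Int × Int × List (Int × Int)) p =>
        let c := d.1 * p.1.2 - d.2 * p.1.1
        if c > 0 then (s.1 + 1, s.2.1, s.2.2 ++ [(p.2.1, p.2.2 + 1)])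
        else if c < 0 then (s.1, s.2.1 + 1, s.2.2 ++ [(p.2.1 + 1, p.2.2)])
        else (s.1, s.2.1, s.2.2 ++ [p.2]))
      (lr.1, lr.2, ([] : List (Int × Int)))
    min s.1 s.2.1 :: goB rest s.2.2

def solve_alt (n : Int) (trees : List (Int × Int)) : String :=
  let lines := trees.map (fun t =>
    let vs := (trees.filter (fun p => p != t)).map (fun p => (p.1 - t.1, p.2 - t.2))
    let mins := goB vs (List.replicate vs.length ((0 : Int), (0 : Int)))
    let best := mins.foldl (fun best b => min best b) (n - 1)
    PySem.Int.toStr best)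
  "\n" ++ PySem.Str.join "\n" lines

-- ===== PRECONDITION & SPEC =====
def Spec_solve (n : Int) (trees : List (Int × Int)) (out : String) : Prop := out = solve_alt n trees
instance (n : Int) (trees : List (Int × Int)) (out : String) : Decidable (Spec_solve n trees out) := by unfold Spec_solve; infer_instance

-- ===== CLAIM (what is proved, stated in full; the proofs are below) =====
def Claim_equal_solve : Prop := ∀ (n : Int) (trees : List (Int × Int)), Dom_solve n trees → Spec_solve n trees (solve n trees)

-- ===== LEMMAS AND PROOFS =====

-- cross product of difference vectors
def cps (d e : Int × Int) : Int := d.1 * e.2 - d.2 * e.1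

def posCnt (d : Int × Int) (l : List (Int × Int)) : Int :=
  ((l.countP (fun e => decide (0 < cps d e)) : Nat) : Int)
def negCnt (d : Int × Int) (l : List (Int × Int)) : Int :=
  ((l.countP (fun e => decide (cps d e < 0)) : Nat) : Int)

-- partial counts carried in goB's accumulator: counts of e against the already-processed ws
def gAcc (ws : List (Int × Int)) (e : Int × Int) : Int × Int := (posCnt e ws, negCnt e ws)

def subP (p t : Int × Int) : Int × Int := (p.1 - t.1, p.2 - t.2)

def vsOf (t : Int × Int) (trees : List (Int × Int)) : List (Int × Int) :=
  (trees.filter (fun p => p != t)).map (fun p => subP p t)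

theorem cps_anti (d e : Int × Int) : cps e d = -cps d e := by
  simp [cps]; ring

theorem innerA (t o : Int × Int) (l : List (Int × Int)) : ∀ a b : Int,
    l.foldl (fun (lr : Int × Int) c =>
      if c == t || c == o then lr
      else
        let test := leftOfLine c t o
        if test > 0 then (lr.1 + 1, lr.2)
        else if test < 0 then (lr.1, lr.2 + 1)
        else lr) (a, b)
    = (a + ((l.countP (fun c => decide (0 < leftOfLine c t o)) : Nat) : Int),
       b + ((l.countP (fun c => decide (leftOfLine c t o < 0)) : Nat) : Int)) := by
  induction l with
  | nil => simp
  | cons c l ih =>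
    intro a b
    by_cases hc : c = t ∨ c = o
    · have h0 : leftOfLine c t o = 0 := by
        rcases hc with h | h <;> subst h <;> simp [leftOfLine] <;> ring
      have hb : (c == t || c == o) = true := by
        rcases hc with h | h <;> simp [h]
      rw [List.foldl_cons, if_pos hb, ih]
      simp [List.countP_cons, h0]
    · rw [not_or] at hc
      have hb : ¬ ((c == t || c == o) = true) := by simp [hc.1, hc.2]
      rcases lt_trichotomy (leftOfLine c t o) 0 with h | h | h
      · simp only [List.foldl_cons, if_neg hb, if_neg (by omega : ¬ leftOfLine c t o > 0),
          if_pos h, ih, List.countP_cons, decide_eq_true_eq]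
        simp only [Prod.mk.injEq]; constructor <;> push_cast <;> omega
      · simp only [List.foldl_cons, if_neg hb, h, if_neg (by omega : ¬ (0:Int) > 0),
          if_neg (by omega : ¬ (0:Int) < 0), ih, List.countP_cons, decide_eq_true_eq]
        simp
      · simp only [List.foldl_cons, if_neg hb, if_pos h, ih, List.countP_cons, decide_eq_true_eq]
        simp only [Prod.mk.injEq]; constructor <;> push_cast <;> omega

theorem countP_transfer (t o : Int × Int) (trees : List (Int × Int)) :
    ((trees.countP (fun c => decide (0 < leftOfLine c t o)) : Nat) : Int) = posCnt (subP o t) (vsOf t trees)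
    ∧ ((trees.countP (fun c => decide (leftOfLine c t o < 0)) : Nat) : Int) = negCnt (subP o t) (vsOf t trees) := by
  refine ⟨?_, ?_⟩ <;>
  · simp only [posCnt, negCnt, vsOf]
    rw [List.countP_map, List.countP_filter]
    congr 1
    apply List.countP_congr
    intro c _
    by_cases hc : c = t
    · subst hc
      have h0 : leftOfLine c c o = 0 := by simp [leftOfLine]; ring
      simp [h0]
    · have he : leftOfLine c t o = cps (subP o t) (subP c t) := by
        simp [leftOfLine, cps, subP]; ring
      simp [Function.comp, he, hc]

theorem goStep_spec (d : Int × Int) (rest : List (Int × Int)) : ∀ (ws : List (Int × Int)) (l r : Int) (out : List (Int × Int)),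
    (rest.zip (rest.map (gAcc ws))).foldl
      (fun (s : Int × Int × List (Int × Int)) p =>
        let c := d.1 * p.1.2 - d.2 * p.1.1
        if c > 0 then (s.1 + 1, s.2.1, s.2.2 ++ [(p.2.1, p.2.2 + 1)])
        else if c < 0 then (s.1, s.2.1 + 1, s.2.2 ++ [(p.2.1 + 1, p.2.2)])
        else (s.1, s.2.1, s.2.2 ++ [p.2])) (l, r, out)
    = (l + posCnt d rest, r + negCnt d rest, out ++ rest.map (gAcc (ws ++ [d]))) := by
  intro ws
  induction rest with
  | nil => intro l r out; simp [posCnt, negCnt]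
  | cons e rest ih =>
    intro l r out
    have he1 : ((0:Int) < cps e d) ↔ (cps d e < 0) := by rw [cps_anti e d]; omega
    have he2 : (cps e d < 0) ↔ ((0:Int) < cps d e) := by rw [cps_anti e d]; omega
    have hpos : posCnt d (e :: rest) = (if 0 < cps d e then 1 else 0) + posCnt d rest := by
      by_cases h : (0:Int) < cps d e <;> simp [posCnt, List.countP_cons, h] <;> push_cast <;> omega
    have hneg : negCnt d (e :: rest) = (if cps d e < 0 then 1 else 0) + negCnt d rest := by
      by_cases h : cps d e < 0 <;> simp [negCnt, List.countP_cons, h] <;> push_cast <;> omega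
    have hgp : posCnt e (ws ++ [d]) = posCnt e ws + (if cps d e < 0 then 1 else 0) := by
      by_cases h : cps d e < 0 <;>
        simp [posCnt, List.countP_append, List.countP_cons, he1, h] <;> push_cast <;> omega
    have hgn : negCnt e (ws ++ [d]) = negCnt e ws + (if 0 < cps d e then 1 else 0) := by
      by_cases h : (0:Int) < cps d e <;>
        simp [negCnt, List.countP_append, List.countP_cons, he2, h] <;> push_cast <;> omega
    have hcd : d.1 * e.2 - d.2 * e.1 = cps d e := rfl
    rcases lt_trichotomy (cps d e) 0 with h | h | h
    · simp only [List.map_cons, List.zip_cons_cons, List.foldl_cons, hcd,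
        if_neg (by omega : ¬ cps d e > 0), if_pos h, ih, hpos, hneg, Prod.mk.injEq]
      refine ⟨by omega, by omega, ?_⟩
      have hg : gAcc (ws ++ [d]) e = ((gAcc ws e).1 + 1, (gAcc ws e).2) := by
        simp [gAcc, hgp, hgn, h, not_lt.mpr (le_of_lt h)]
      simp [hg]
    · simp only [List.map_cons, List.zip_cons_cons, List.foldl_cons, hcd, h,
        if_neg (by omega : ¬ (0:Int) > 0), if_neg (by omega : ¬ (0:Int) < 0), ih, hpos, hneg,
        Prod.mk.injEq]
      refine ⟨by omega, by omega, ?_⟩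
      have hg : gAcc (ws ++ [d]) e = gAcc ws e := by
        simp [gAcc, hgp, hgn, h]
      simp [hg]
    · simp only [List.map_cons, List.zip_cons_cons, List.foldl_cons, hcd, if_pos h, ih, hpos, hneg,
        Prod.mk.injEq]
      refine ⟨by omega, by omega, ?_⟩
      have hg : gAcc (ws ++ [d]) e = ((gAcc ws e).1, (gAcc ws e).2 + 1) := by
        simp [gAcc, hgp, hgn, h, not_lt.mpr (le_of_lt h)]
      simp [hg]

theorem goB_spec : ∀ (vs ws : List (Int × Int)),
    goB vs (vs.map (gAcc ws))
    = vs.map (fun d => min (posCnt d (ws ++ vs)) (negCnt d (ws ++ vs))) := by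
  intro vs
  induction vs with
  | nil => intro ws; rfl
  | cons d rest ih =>
    intro ws
    rw [List.map_cons, goB, goStep_spec d rest ws (gAcc ws d).1 (gAcc ws d).2 []]
    have hhp : (gAcc ws d).1 + posCnt d rest = posCnt d (ws ++ d :: rest) := by
      simp [gAcc, posCnt, List.countP_append, List.countP_cons, cps, mul_comm]
    have hhn : (gAcc ws d).2 + negCnt d rest = negCnt d (ws ++ d :: rest) := by
      simp [gAcc, negCnt, List.countP_append, List.countP_cons, cps, mul_comm]
    rw [List.nil_append, ih (ws ++ [d])]
    simp only [hhp, hhn]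
    congr 1
    apply List.map_congr_left
    intro x _
    simp

theorem map_gAcc_nil (vs : List (Int × Int)) :
    vs.map (gAcc []) = List.replicate vs.length ((0 : Int), (0 : Int)) := by
  induction vs with
  | nil => rfl
  | cons d rest ih => simp [gAcc, posCnt, negCnt, ih, List.replicate_succ]

theorem midA (t : Int × Int) (trees : List (Int × Int)) : ∀ (l : List (Int × Int)) (best : Int),
    l.foldl (fun bestcutdown othertree =>
      if othertree == t then bestcutdown
      else
        let lr := trees.foldl (fun (lr : Int × Int) checktree =>
          if checktree == t || checktree == othertree then lr
          else
            let test := leftOfLine checktree t othertree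
            if test > 0 then (lr.1 + 1, lr.2)
            else if test < 0 then (lr.1, lr.2 + 1)
            else lr) ((0 : Int), (0 : Int))
        let best := min lr.1 lr.2
        if best < bestcutdown then best else bestcutdown) best
    = ((l.filter (fun p => p != t)).map (fun o =>
        min (posCnt (subP o t) (vsOf t trees)) (negCnt (subP o t) (vsOf t trees)))).foldl
        (fun b x => min b x) best := by
  intro l
  induction l with
  | nil => intro best; rfl
  | cons o l ih =>
    intro best
    by_cases h : o = t
    · have hb : (o == t) = true := by simp [h]
      have hbn : (o != t) = false := by simp [bne, hb]
      simp only [List.foldl_cons, List.filter_cons, hbn, Bool.false_eq_true, if_false,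
        if_pos hb]
      exact ih best
    · have hb : (o == t) = false := by simp [h]
      have hbn : (o != t) = true := by simp [bne, hb]
      simp only [List.foldl_cons, List.filter_cons, hbn, if_true, List.map_cons,
        if_neg (show ¬ ((o == t) = true) by simp [hb]), innerA t o trees, zero_add,
        (countP_transfer t o trees).1, (countP_transfer t o trees).2]
      rw [ih]
      congr 1
      omega

theorem perTree (n : Int) (trees : List (Int × Int)) (t : Int × Int) :
    (trees.foldl (fun bestcutdown othertree =>
      if othertree == t then bestcutdown
      else
        let lr := trees.foldl (fun (lr : Int × Int) checktree =>
          if checktree == t || checktree == othertree then lr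
          else
            let test := leftOfLine checktree t othertree
            if test > 0 then (lr.1 + 1, lr.2)
            else if test < 0 then (lr.1, lr.2 + 1)
            else lr) ((0 : Int), (0 : Int))
        let best := min lr.1 lr.2
        if best < bestcutdown then best else bestcutdown) (n - 1))
    = (goB (vsOf t trees) (List.replicate (vsOf t trees).length ((0 : Int), (0 : Int)))).foldl
        (fun best b => min best b) (n - 1) := by
  rw [midA t trees trees (n - 1), ← map_gAcc_nil, goB_spec]
  simp only [List.nil_append, vsOf, List.map_map]
  rfl

-- ===== VERDICT (by name: the statement is the Claim_ definition above) =====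
theorem solve_spec : Claim_equal_solve := by
  intro n trees _
  unfold Spec_solve solve solve_alt
  dsimp only
  rw [PySem.List.foldl_append_singleton_eq_map]
  simp only [List.nil_append]
  congr 1
  congr 1
  apply List.map_congr_left
  intro t _
  congr 1
  have h := perTree n trees t
  simp only [vsOf, subP] at h
  exact h
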